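-- pv_equiv track=rewrite | github.com/jasso23monkey/SE-Practica-1-Juan-Jasso | IA-Juan-Jasso/01_Búsqueda_Grafos/03_Satisfacción_De_Restricciones/002_Vuelta_Atras.py | es_consistente
-- ===== SOURCE A (Python) =====
-- RESTRICCIONES_VECINOS = [('A', 'B'), ('A', 'C')]
--
-- def es_consistente(variable, valor, asignacion):
--     """
--     Verifica si asignar 'valor' a 'variable' viola alguna restricción
--     con las asignaciones que ya están hechas.
--     """
--     for v1, v2 in RESTRICCIONES_VECINOS:
--         # Chequea la restricción (v1 != v2)
--
--         # 1. Caso: La variable actual es v1 y v2 ya está asignada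
--         if v1 == variable and v2 in asignacion:
--             if valor == asignacion[v2]:
--                 return False  # Conflicto: el valor es igual al del vecino asignado
--
--         # 2. Caso: La variable actual es v2 y v1 ya está asignada
--         elif v2 == variable and v1 in asignacion:
--             if valor == asignacion[v1]:
--                 return False  # Conflicto
--
--     return True
-- ===== SOURCE B (Python) =====
-- RESTRICCIONES_VECINOS = [('A', 'B'), ('A', 'C')]
--
-- # Adjacency map precomputed once: each variable -> list of its neighbors,
-- # in the order the constraints mention them.
-- _VECINOS = {}
-- for _v1, _v2 in RESTRICCIONES_VECINOS:
--     _VECINOS.setdefault(_v1, []).append(_v2)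
--     _VECINOS.setdefault(_v2, []).append(_v1)
--
--
-- def es_consistente(variable, valor, asignacion):
--     for vecino in _VECINOS.get(variable, []):
--         if vecino in asignacion and valor == asignacion[vecino]:
--             return False
--     return True
-- ===== Notes on version B (the rewrite author's own statement) =====
-- stated objective: simpler
-- what changed: B pre-indexes the constraint pairs into an adjacency map (variable -> neighbor list) built once at module load, so es_consistente only walks the neighbors of the given variable instead of scanning every constraint pair with two symmetric branches.
import Mathlib
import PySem

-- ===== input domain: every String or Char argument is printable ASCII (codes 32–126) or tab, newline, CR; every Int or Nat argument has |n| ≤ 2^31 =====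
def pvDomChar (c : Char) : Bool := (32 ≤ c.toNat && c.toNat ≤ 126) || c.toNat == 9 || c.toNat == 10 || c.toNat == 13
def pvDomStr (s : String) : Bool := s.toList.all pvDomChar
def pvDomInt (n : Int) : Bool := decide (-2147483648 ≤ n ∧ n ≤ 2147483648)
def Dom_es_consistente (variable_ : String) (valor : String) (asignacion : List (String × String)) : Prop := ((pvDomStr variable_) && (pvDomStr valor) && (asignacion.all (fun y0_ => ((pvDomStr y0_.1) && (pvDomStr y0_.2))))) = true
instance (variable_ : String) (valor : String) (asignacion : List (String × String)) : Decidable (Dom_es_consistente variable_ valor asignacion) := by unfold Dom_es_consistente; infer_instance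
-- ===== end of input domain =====

-- B replaces A's scan over all constraint pairs (with two symmetric branches) by a
-- lookup in an adjacency map built once from the pairs; objective: simpler per-call loop.

-- ===== PORT A =====
def RESTRICCIONES_VECINOS : List (String × String) := [("A", "B"), ("A", "C")]

-- the for-loop with early return, step for step ('x in dict' = contains, dict[x] = get?,
-- exact here because it is only read under contains)
def esConsLoopA (variable_ : String) (valor : String) (asig : PySem.Dict String String) :
    List (String × String) → Bool
  | [] => true
  | (v1, v2) :: rest =>
    if v1 == variable_ && asig.contains v2 then
      if valor == (asig.get? v2).getD "" then false
      else esConsLoopA variable_ valor asig rest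
    else if v2 == variable_ && asig.contains v1 then
      if valor == (asig.get? v1).getD "" then false
      else esConsLoopA variable_ valor asig rest
    else esConsLoopA variable_ valor asig rest

def es_consistente (variable_ : String) (valor : String) (asignacion : List (String × String)) : Bool :=
  esConsLoopA variable_ valor (PySem.Dict.mk asignacion) RESTRICCIONES_VECINOS

-- ===== PORT B =====
-- module-level adjacency map: _VECINOS, built by setdefault/append over the pairs
def vecinosAdj : PySem.Dict String (List String) :=
  RESTRICCIONES_VECINOS.foldl
    (fun d p =>
      let d1 := d.insert p.1 (d.getD p.1 [] ++ [p.2])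
      d1.insert p.2 (d1.getD p.2 [] ++ [p.1]))
    PySem.Dict.empty

def esConsLoopB (valor : String) (asig : PySem.Dict String String) : List String → Bool
  | [] => true
  | n :: rest =>
    if asig.contains n && valor == (asig.get? n).getD "" then false
    else esConsLoopB valor asig rest

def es_consistente_alt (variable_ : String) (valor : String) (asignacion : List (String × String)) : Bool :=
  esConsLoopB valor (PySem.Dict.mk asignacion) (vecinosAdj.getD variable_ [])

-- ===== PRECONDITION & SPEC =====
def Spec_es_consistente (variable_ : String) (valor : String) (asignacion : List (String × String)) (out : Bool) : Prop := out = es_consistente_alt variable_ valor asignacion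
instance (variable_ : String) (valor : String) (asignacion : List (String × String)) (out : Bool) : Decidable (Spec_es_consistente variable_ valor asignacion out) := by unfold Spec_es_consistente; infer_instance

-- ===== CLAIM (what is proved, stated in full; the proofs are below) =====
def Claim_equal_es_consistente : Prop := ∀ (variable_ : String) (valor : String) (asignacion : List (String × String)), Dom_es_consistente variable_ valor asignacion → Spec_es_consistente variable_ valor asignacion (es_consistente variable_ valor asignacion)

-- ===== LEMMAS AND PROOFS =====
theorem vecinosAdj_eval :
    vecinosAdj = PySem.Dict.mk [("A", ["B", "C"]), ("B", ["A"]), ("C", ["A"])] := by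
  decide

-- ===== VERDICT (by name: the statement is the Claim_ definition above) =====
theorem es_consistente_spec : Claim_equal_es_consistente := by
  intro variable_ valor asignacion _
  unfold Spec_es_consistente es_consistente es_consistente_alt
  rw [vecinosAdj_eval]
  by_cases hA : variable_ = "A" <;> by_cases hB : variable_ = "B" <;>
    by_cases hC : variable_ = "C" <;>
    simp_all [RESTRICCIONES_VECINOS, esConsLoopA, esConsLoopB,
      PySem.Dict.getD, PySem.Dict.get?_mk_cons, beq_eq_decide] <;>
    (try split_ifs) <;> (try simp_all [beq_eq_decide]) <;>
    first
      | (rename_i h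
         obtain ⟨x, hx⟩ := h
         have hany : asignacion.any (fun p => decide (p.1 = "B")) = true :=
           List.any_eq_true.mpr ⟨("B", x), hx, by simp⟩
         simp [hany])
      | (rename_i h
         intro _
         left
         intro a b hm ha
         exact h b (ha ▸ hm))
      | simp [PySem.Dict.get?, esConsLoopB]
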